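-- pv_equiv track=rewrite | github.com/enderstream/DoitAlgorithm | 046_18352_특정 거리의 도시 찾기/main_ver2.py | BFS
-- ===== SOURCE A (Python) =====
-- from collections import defaultdict, deque
--
-- def BFS(N: int, K: int, X: int, city: defaultdict) -> list:
--     visited = [False] * (N + 1)
--     dist = [0] * (N + 1)
--     Q = deque([X])
--     visited[X] = True
--
--     while Q:
--         curr = Q.popleft()
--         for node in range(1, N + 1):
--             if visited[node] or city.get(curr) is None or node not in city[curr]:
--                 continue
--
--             dist[node] = dist[curr] + 1
--
--             if dist[node] > K:
--                 return dist
--             visited[node] = True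
--             Q.append(node)
--     return dist
-- ===== SOURCE B (Python) =====
-- def BFS(N, K, X, city):
--     visited = [False] * (N + 1)
--     dist = [0] * (N + 1)
--     visited[X] = True
--     frontier = [X]
--     d = 0
--     while frontier:
--         d += 1
--         nxt = []
--         for curr in frontier:
--             for node in sorted(set(city.get(curr, ()))):
--                 if 1 <= node <= N and not visited[node]:
--                     dist[node] = d
--                     if d > K:
--                         return dist
--                     visited[node] = True
--                     nxt.append(node)
--         frontier = nxt
--     return dist
-- ===== Notes on version B (the rewrite author's own statement) =====
-- stated objective: alternative
-- what changed: Replaces A's queue BFS that rescans all nodes 1..N with a linear 'node in city[curr]' test for every popped vertex by level-by-level frontier BFS that iterates each vertex's sorted(set(...)) adjacency directly and tracks the distance as the level counter instead of reading it back from the dist array.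
import Mathlib
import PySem

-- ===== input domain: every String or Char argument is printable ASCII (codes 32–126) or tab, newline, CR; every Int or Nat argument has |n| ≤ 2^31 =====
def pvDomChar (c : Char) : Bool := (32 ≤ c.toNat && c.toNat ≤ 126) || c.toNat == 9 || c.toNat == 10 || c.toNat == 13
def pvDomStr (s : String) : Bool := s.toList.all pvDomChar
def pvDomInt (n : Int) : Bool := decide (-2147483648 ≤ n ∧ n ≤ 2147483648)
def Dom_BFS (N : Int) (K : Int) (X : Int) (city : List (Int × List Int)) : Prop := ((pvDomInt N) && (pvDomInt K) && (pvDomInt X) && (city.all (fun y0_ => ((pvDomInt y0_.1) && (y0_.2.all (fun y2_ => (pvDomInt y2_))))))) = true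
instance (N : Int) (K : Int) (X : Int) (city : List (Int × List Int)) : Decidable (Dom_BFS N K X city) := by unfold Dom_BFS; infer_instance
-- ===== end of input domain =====

-- B replaces A's queue BFS (which, for every popped vertex, rescans ALL nodes 1..N with a linear
-- `node in city[curr]` membership test) by level-by-level frontier BFS iterating each vertex's
-- sorted(set(...)) adjacency directly, with the distance kept as a level counter; objective:
-- alternative (degree-proportional work per vertex instead of a scan of all nodes).

-- ===== PORT A =====
-- inner `for node in range(1, N+1)` loop of A; `Sum.inr dist` models the early `return dist`
def bfsInnerA (K : Int) (curr : Int) (adj? : Option (List Int)) :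
    List Int → List Bool → List Int → List Int → (List Bool × List Int × List Int) ⊕ List Int
  | [], v, d, q => Sum.inl (v, d, q)
  | node :: rest, v, d, q =>
    if PySem.List.pyGetD v node false || adj?.isNone || !((adj?.getD []).contains node) then
      bfsInnerA K curr adj? rest v d q
    else
      let dn := PySem.List.pyGetD d curr 0 + 1
      let d' := PySem.List.pySetD d node dn
      if dn > K then Sum.inr d'
      else bfsInnerA K curr adj? rest (PySem.List.pySetD v node true) d' (q ++ [node])

-- `while Q:` loop of A; fuel only makes the recursion structural (N+2 pops can never be exhausted:
-- every node is enqueued at most once)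
def bfsLoopA (N : Int) (K : Int) (cityD : PySem.Dict Int (List Int)) :
    Nat → List Int → List Bool → List Int → List Int
  | 0, _, _, d => d
  | _ + 1, [], _, d => d
  | fuel + 1, curr :: qrest, v, d =>
    match bfsInnerA K curr (PySem.Dict.get? cityD curr) (PySem.List.pyRange 1 (N + 1) 1) v d qrest with
    | Sum.inr d' => d'
    | Sum.inl (v', d', q') => bfsLoopA N K cityD fuel q' v' d'

def BFS (N : Int) (K : Int) (X : Int) (city : List (Int × List Int)) : List Int :=
  let visited := List.replicate (N + 1).toNat false
  let dist : List Int := List.replicate (N + 1).toNat (0 : Int)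
  bfsLoopA N K (PySem.Dict.ofList city) (N.toNat + 2) [X] (PySem.List.pySetD visited X true) dist

-- ===== PORT B =====
-- innermost `for node in sorted(set(city.get(curr, ())))` loop of B; lvl is B's level counter d
def bfsNbrB (N : Int) (K : Int) (lvl : Int) :
    List Int → List Bool → List Int → List Int → (List Bool × List Int × List Int) ⊕ List Int
  | [], v, d, nxt => Sum.inl (v, d, nxt)
  | node :: ns, v, d, nxt =>
    if decide (1 ≤ node) && decide (node ≤ N) && !(PySem.List.pyGetD v node false) then
      let d' := PySem.List.pySetD d node lvl
      if lvl > K then Sum.inr d'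
      else bfsNbrB N K lvl ns (PySem.List.pySetD v node true) d' (nxt ++ [node])
    else bfsNbrB N K lvl ns v d nxt

-- `for curr in frontier:` loop of B, building the next frontier nxt
def bfsLevelB (N : Int) (K : Int) (cityD : PySem.Dict Int (List Int)) (lvl : Int) :
    List Int → List Bool → List Int → List Int → (List Bool × List Int × List Int) ⊕ List Int
  | [], v, d, nxt => Sum.inl (v, d, nxt)
  | curr :: frest, v, d, nxt =>
    match bfsNbrB N K lvl
        (PySem.List.sorted (PySem.Set.ofList (PySem.Dict.getD cityD curr [])) (fun x => x) false)
        v d nxt with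
    | Sum.inr d' => Sum.inr d'
    | Sum.inl (v', d', nxt') => bfsLevelB N K cityD lvl frest v' d' nxt'

-- `while frontier:` loop of B; one fuel unit per level (at most N+2 levels exist)
def bfsOuterB (N : Int) (K : Int) (cityD : PySem.Dict Int (List Int)) :
    Nat → Int → List Int → List Bool → List Int → List Int
  | 0, _, _, _, d => d
  | _ + 1, _, [], _, d => d
  | fuel + 1, lvl, frontier, v, d =>
    match bfsLevelB N K cityD (lvl + 1) frontier v d [] with
    | Sum.inr d' => d'
    | Sum.inl (v', d', nxt) => bfsOuterB N K cityD fuel (lvl + 1) nxt v' d'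

def BFS_alt (N : Int) (K : Int) (X : Int) (city : List (Int × List Int)) : List Int :=
  let visited := List.replicate (N + 1).toNat false
  let dist : List Int := List.replicate (N + 1).toNat (0 : Int)
  bfsOuterB N K (PySem.Dict.ofList city) (N.toNat + 2) 0 [X] (PySem.List.pySetD visited X true) dist

-- ===== PRECONDITION & SPEC =====
-- Pre_ excludes exactly the inputs where Python A raises IndexError at `visited[X] = True`
-- (X outside [-(N+1), N], including every input with N < 0).
def Pre_BFS (N : Int) (K : Int) (X : Int) (city : List (Int × List Int)) : Prop :=
  PySem.Raise.InRange (N + 1).toNat X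
instance (N : Int) (K : Int) (X : Int) (city : List (Int × List Int)) : Decidable (Pre_BFS N K X city) := by
  unfold Pre_BFS; infer_instance

def pvWitness_BFS : Int × Int × Int × (List (Int × List Int)) :=
  (4, 2, 1, [(1, [2, 3]), (2, [4]), (3, [1])])

def Spec_BFS (N : Int) (K : Int) (X : Int) (city : List (Int × List Int)) (out : List Int) : Prop := out = BFS_alt N K X city
instance (N : Int) (K : Int) (X : Int) (city : List (Int × List Int)) (out : List Int) : Decidable (Spec_BFS N K X city out) := by unfold Spec_BFS; infer_instance

-- ===== CLAIM (what is proved, stated in full; the proofs are below) =====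
def Claim_equal_BFS : Prop := ∀ (N : Int) (K : Int) (X : Int) (city : List (Int × List Int)), Dom_BFS N K X city → Pre_BFS N K X city → Spec_BFS N K X city (BFS N K X city)

-- ===== LEMMAS AND PROOFS =====

theorem pyIdx?_lt (n : Nat) (i : Int) (k : Nat) (h : PySem.List.pyIdx? n i = some k) : k < n := by
  simp only [PySem.List.pyIdx?] at h
  split_ifs at h <;> (try simp_all) <;> (try omega)

theorem pyIdx?_inrange (n : Nat) (i : Int) (h : PySem.Raise.InRange n i) :
    ∃ k, PySem.List.pyIdx? n i = some k := by
  obtain ⟨h1, h2⟩ := h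
  simp only [PySem.List.pyIdx?]
  split_ifs <;> (try simp_all) <;> (try omega)

theorem pyGetD_some {α : Type} (xs : List α) (i : Int) (d : α) (k : Nat)
    (h : PySem.List.pyIdx? xs.length i = some k) :
    PySem.List.pyGetD xs i d = xs.getD k d := by
  simp only [PySem.List.pyGetD, PySem.List.pyGet?, h, Option.bind_some]
  have := pyIdx?_lt _ _ _ h
  rw [List.getElem?_eq_getElem this, List.getD_eq_getElem _ _ this]
  rfl

theorem pyGetD_none {α : Type} (xs : List α) (i : Int) (d : α)
    (h : PySem.List.pyIdx? xs.length i = none) :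
    PySem.List.pyGetD xs i d = d := by
  simp [PySem.List.pyGetD, PySem.List.pyGet?, h]

theorem pySetD_some {α : Type} (xs : List α) (i : Int) (v : α) (k : Nat)
    (h : PySem.List.pyIdx? xs.length i = some k) :
    PySem.List.pySetD xs i v = xs.set k v := by
  simp [PySem.List.pySetD, PySem.List.pySet?, h]

theorem pySetD_none {α : Type} (xs : List α) (i : Int) (v : α)
    (h : PySem.List.pyIdx? xs.length i = none) :
    PySem.List.pySetD xs i v = xs := by
  simp [PySem.List.pySetD, PySem.List.pySet?, h]

theorem pyGetD_true_mono (v : List Bool) (i c : Int)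
    (h : PySem.List.pyGetD v c false = true) :
    PySem.List.pyGetD (PySem.List.pySetD v i true) c false = true := by
  cases hi : PySem.List.pyIdx? v.length i with
  | none => rw [pySetD_none _ _ _ hi]; exact h
  | some k =>
    rw [pySetD_some _ _ _ _ hi]
    have hk := pyIdx?_lt _ _ _ hi
    have hlen : (v.set k true).length = v.length := by simp
    cases hc : PySem.List.pyIdx? v.length c with
    | none => rw [pyGetD_none _ _ _ hc] at h; cases h
    | some j =>
      rw [pyGetD_some _ _ _ _ hc] at h
      rw [pyGetD_some _ _ _ j (by rw [hlen]; exact hc)]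
      have hj := pyIdx?_lt _ _ _ hc
      by_cases hjk : j = k
      · subst hjk
        rw [List.getD_eq_getElem _ _ (by simpa using hj), List.getElem_set_self]
      · rw [List.getD_eq_getElem _ _ (by simpa using hj), List.getElem_set_ne (by omega)]
        rw [List.getD_eq_getElem _ _ hj] at h
        exact h

theorem pyGetD_stable_of_visited (v : List Bool) (d : List Int) (i c : Int) (x : Int)
    (hlen : v.length = d.length)
    (hc : PySem.List.pyGetD v c false = true)
    (hi : PySem.List.pyGetD v i false = false) :
    PySem.List.pyGetD (PySem.List.pySetD d i x) c 0 = PySem.List.pyGetD d c 0 := by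
  cases hI : PySem.List.pyIdx? d.length i with
  | none => rw [pySetD_none _ _ _ hI]
  | some k =>
    rw [pySetD_some _ _ _ _ hI]
    have hk := pyIdx?_lt _ _ _ hI
    have hsl : (d.set k x).length = d.length := by simp
    cases hC : PySem.List.pyIdx? d.length c with
    | none =>
      rw [pyGetD_none _ _ _ hC, pyGetD_none _ _ _ (by rw [hsl]; exact hC)]
    | some j =>
      have hj := pyIdx?_lt _ _ _ hC
      rw [pyGetD_some _ _ _ _ hC, pyGetD_some _ _ _ j (by rw [hsl]; exact hC)]
      rw [pyGetD_some _ _ false j (by rw [hlen]; exact hC)] at hc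
      rw [pyGetD_some _ _ false k (by rw [hlen]; exact hI)] at hi
      have hjk : j ≠ k := by
        intro hEq; subst hEq
        rw [List.getD_eq_getElem _ _ (by omega)] at hc hi
        rw [hc] at hi; cases hi
      rw [List.getD_eq_getElem _ _ (by simpa using hj), List.getElem_set_ne (by omega),
          List.getD_eq_getElem _ _ hj]

theorem pyGetD_pySetD_self {α : Type} (xs : List α) (i : Int) (x : α) (dflt : α)
    (h : PySem.Raise.InRange xs.length i) :
    PySem.List.pyGetD (PySem.List.pySetD xs i x) i dflt = x := by
  obtain ⟨k, hk⟩ := pyIdx?_inrange _ _ h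
  have hklt := pyIdx?_lt _ _ _ hk
  rw [pySetD_some _ _ _ _ hk]
  have hsl : (xs.set k x).length = xs.length := by simp
  rw [pyGetD_some _ _ _ k (by rw [hsl]; exact hk)]
  rw [List.getD_eq_getElem _ _ (by simpa using hklt), List.getElem_set_self]

theorem count_false_set (v : List Bool) (i : Int)
    (h0 : 0 ≤ i) (h1 : i < (v.length : Int))
    (hi : PySem.List.pyGetD v i false = false) :
    (PySem.List.pySetD v i true).count false + 1 = v.count false := by
  have hidx : PySem.List.pyIdx? v.length i = some i.toNat := by
    simp only [PySem.List.pyIdx?]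
    rw [if_pos h0, if_pos h1]
  have hk : i.toNat < v.length := by omega
  rw [pyGetD_some _ _ _ _ hidx, List.getD_eq_getElem _ _ hk] at hi
  rw [pySetD_some _ _ _ _ hidx, List.count_set hk]
  have hmem : false ∈ v := hi ▸ List.getElem_mem hk
  have hpos : 0 < v.count false := List.count_pos_iff.mpr hmem
  simp [hi]
  omega

theorem pyGetD_replicate_zero (n : Nat) (i : Int) :
    PySem.List.pyGetD (List.replicate n (0 : Int)) i 0 = 0 := by
  cases h : PySem.List.pyIdx? (List.replicate n (0:Int)).length i with
  | none => rw [pyGetD_none _ _ _ h]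
  | some k =>
    have hk := pyIdx?_lt _ _ _ h
    rw [pyGetD_some _ _ _ _ h, List.getD_eq_getElem _ _ hk]
    simp

def bfsInnerC (K : Int) (curr : Int) :
    List Int → List Bool → List Int → List Int → (List Bool × List Int × List Int) ⊕ List Int
  | [], v, d, q => Sum.inl (v, d, q)
  | node :: rest, v, d, q =>
    if PySem.List.pyGetD v node false then
      bfsInnerC K curr rest v d q
    else
      let dn := PySem.List.pyGetD d curr 0 + 1
      let d' := PySem.List.pySetD d node dn
      if dn > K then Sum.inr d'
      else bfsInnerC K curr rest (PySem.List.pySetD v node true) d' (q ++ [node])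

def bfsInnerD (K : Int) (dn : Int) :
    List Int → List Bool → List Int → List Int → (List Bool × List Int × List Int) ⊕ List Int
  | [], v, d, q => Sum.inl (v, d, q)
  | node :: rest, v, d, q =>
    if PySem.List.pyGetD v node false then
      bfsInnerD K dn rest v d q
    else
      let d' := PySem.List.pySetD d node dn
      if dn > K then Sum.inr d'
      else bfsInnerD K dn rest (PySem.List.pySetD v node true) d' (q ++ [node])

theorem innerA_eq_innerC (K curr : Int) (adj? : Option (List Int)) :
    ∀ (nodes : List Int) (v : List Bool) (d q : List Int),
      bfsInnerA K curr adj? nodes v d q =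
        bfsInnerC K curr (nodes.filter (fun n => (adj?.getD []).contains n)) v d q := by
  intro nodes
  induction nodes with
  | nil => intro v d q; rfl
  | cons node rest ih =>
    intro v d q
    rw [bfsInnerA]
    by_cases hm : (adj?.getD []).contains node = true
    · have hsome : adj?.isNone = false := by
        cases adj?
        · simp at hm
        · rfl
      rw [List.filter_cons_of_pos hm, bfsInnerC]
      simp only [hm, hsome, Bool.not_true, Bool.or_false]
      by_cases hv : PySem.List.pyGetD v node false = true
      · rw [if_pos hv, if_pos hv]
        exact ih v d q
      · have hv' : PySem.List.pyGetD v node false = false := by simpa using hv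
        simp only [hv', Bool.false_eq_true, if_false]
        split_ifs
        · rfl
        · exact ih _ _ _
    · have hnm : node ∉ adj?.getD [] := by simpa using hm
      rw [List.filter_cons_of_neg (by simpa using hm)]
      have hg : (PySem.List.pyGetD v node false || adj?.isNone || !(adj?.getD []).contains node)
          = true := by simp [hnm]
      simp only [hg, if_true]
      exact ih v d q

theorem nbrB_eq_innerD (N K lvl : Int) :
    ∀ (nodes : List Int) (v : List Bool) (d q : List Int),
      bfsNbrB N K lvl nodes v d q =
        bfsInnerD K lvl (nodes.filter (fun n => decide (1 ≤ n) && decide (n ≤ N))) v d q := by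
  intro nodes
  induction nodes with
  | nil => intro v d q; rfl
  | cons node rest ih =>
    intro v d q
    rw [bfsNbrB]
    by_cases hin : 1 ≤ node ∧ node ≤ N
    · rw [List.filter_cons_of_pos (by simp [hin.1, hin.2]), bfsInnerD]
      by_cases hv : PySem.List.pyGetD v node false = true
      · simp only [hv, hin.1, hin.2, decide_true, Bool.not_true, Bool.and_false,
          Bool.false_eq_true, if_false]
        exact ih v d q
      · have hv' : PySem.List.pyGetD v node false = false := by simpa using hv
        simp only [hv', hin.1, hin.2, decide_true, Bool.not_false,
          Bool.and_self, if_true, Bool.false_eq_true, if_false]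
        split_ifs
        · rfl
        · exact ih _ _ _
    · rw [List.filter_cons_of_neg (by simp; omega)]
      have hg : (decide (1 ≤ node) && decide (node ≤ N) && !(PySem.List.pyGetD v node false))
          = false := by
        rcases (by omega : node < 1 ∨ N < node) with h | h <;> simp [h]
      simp only [hg, Bool.false_eq_true, if_false]
      exact ih v d q

theorem filter_lists_eq (N : Int) (vs : List Int) :
    (PySem.List.pyRange 1 (N + 1) 1).filter (fun n => vs.contains n) =
      (PySem.List.sorted (PySem.Set.ofList vs) (fun x => x) false).filter
        (fun n => decide (1 ≤ n) && decide (n ≤ N)) := by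
  have hL : ((PySem.List.pyRange 1 (N + 1) 1).filter (fun n => vs.contains n)).Pairwise (· < ·) :=
    (PySem.List.pairwise_lt_pyRange_one 1 (N + 1)).filter _
  have hsortnd : (PySem.List.sorted (PySem.Set.ofList vs) (fun x => x) false).Nodup :=
    (PySem.List.sorted_perm (PySem.Set.ofList vs) (fun x => x) false).nodup_iff.mpr
      (PySem.Set.nodup_ofList vs)
  have hsortlt : (PySem.List.sorted (PySem.Set.ofList vs) (fun x => x) false).Pairwise (· < ·) := by
    have hle := PySem.List.sorted_pairwise (PySem.Set.ofList vs) (fun x => x)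
    exact (hle.and hsortnd).imp (fun h => lt_of_le_of_ne h.1 h.2)
  have hR : (((PySem.List.sorted (PySem.Set.ofList vs) (fun x => x) false)).filter
      (fun n => decide (1 ≤ n) && decide (n ≤ N))).Pairwise (· < ·) := hsortlt.filter _
  have hmem : ∀ x : Int,
      x ∈ (PySem.List.pyRange 1 (N + 1) 1).filter (fun n => vs.contains n) ↔
      x ∈ ((PySem.List.sorted (PySem.Set.ofList vs) (fun x => x) false)).filter
        (fun n => decide (1 ≤ n) && decide (n ≤ N)) := by
    intro x
    simp [List.mem_filter, PySem.List.mem_pyRange_one,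
      (PySem.List.sorted_perm (PySem.Set.ofList vs) (fun x => x) false).mem_iff,
      PySem.Set.mem_ofList]
    tauto
  have hp := List.perm_of_nodup_nodup_toFinset_eq (hL.imp ne_of_lt) (hR.imp ne_of_lt)
    (by ext x; simpa using hmem x)
  exact hp.eq_of_pairwise (fun a b _ _ hab hba => le_antisymm hab hba)
    (hL.imp le_of_lt) (hR.imp le_of_lt)

theorem innerC_eq_innerD (K curr : Int) :
    ∀ (nodes : List Int) (v : List Bool) (d q : List Int),
      v.length = d.length →
      PySem.List.pyGetD v curr false = true →
      bfsInnerC K curr nodes v d q =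
        bfsInnerD K (PySem.List.pyGetD d curr 0 + 1) nodes v d q := by
  intro nodes
  induction nodes with
  | nil => intro v d q _ _; rfl
  | cons node rest ih =>
    intro v d q hlen hc
    rw [bfsInnerC, bfsInnerD]
    by_cases hv : PySem.List.pyGetD v node false = true
    · rw [if_pos hv, if_pos hv]
      exact ih v d q hlen hc
    · have hv' : PySem.List.pyGetD v node false = false := by simpa using hv
      simp only [hv', Bool.false_eq_true, if_false]
      split_ifs
      · rfl
      · have hstab := pyGetD_stable_of_visited v d node curr
          (PySem.List.pyGetD d curr 0 + 1) hlen hc hv'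
        rw [ih (PySem.List.pySetD v node true)
              (PySem.List.pySetD d node (PySem.List.pyGetD d curr 0 + 1)) (q ++ [node])
              (by simp [PySem.List.length_pySetD, hlen])
              (pyGetD_true_mono v node curr hc),
            hstab]

def InnerPost (dn : Int) (v : List Bool) (d : List Int) (q : List Int)
    (v' : List Bool) (d' : List Int) (q' : List Int) : Prop :=
  (∃ new, q' = q ++ new ∧
    (∀ c ∈ new, PySem.List.pyGetD v' c false = true ∧ PySem.List.pyGetD d' c 0 = dn) ∧
    new.length + v'.count false ≤ v.count false) ∧
  v'.length = v.length ∧ d'.length = d.length ∧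
  (∀ c, PySem.List.pyGetD v c false = true → PySem.List.pyGetD v' c false = true) ∧
  (∀ c, PySem.List.pyGetD v c false = true →
    PySem.List.pyGetD d' c 0 = PySem.List.pyGetD d c 0)

theorem innerD_post (K dn : Int) :
    ∀ (nodes : List Int) (v : List Bool) (d q : List Int),
      v.length = d.length →
      (∀ n ∈ nodes, 0 ≤ n ∧ n < (v.length : Int)) →
      (∀ v' d' q', bfsInnerD K dn nodes v d q = Sum.inl (v', d', q') →
        InnerPost dn v d q v' d' q') := by
  intro nodes
  induction nodes with
  | nil =>
    intro v d q _ _ v' d' q' h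
    rw [bfsInnerD] at h
    cases h
    exact ⟨⟨[], by simp, by simp, by simp⟩, rfl, rfl, fun _ h => h, fun _ _ => rfl⟩
  | cons node rest ih =>
    intro v d q hlen hb v' d' q' h
    have hnode := hb node (by simp)
    have hrest : ∀ n ∈ rest, 0 ≤ n ∧ n < (v.length : Int) := fun n hn => hb n (by simp [hn])
    rw [bfsInnerD] at h
    by_cases hv : PySem.List.pyGetD v node false = true
    · rw [if_pos hv] at h
      exact ih v d q hlen hrest v' d' q' h
    · have hv' : PySem.List.pyGetD v node false = false := by simpa using hv
      simp only [hv', Bool.false_eq_true, if_false] at h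
      by_cases hK : dn > K
      · rw [if_pos hK] at h; cases h
      · rw [if_neg hK] at h
        set v₁ := PySem.List.pySetD v node true with hv₁
        set d₁ := PySem.List.pySetD d node dn with hd₁
        have hlen1 : v₁.length = d₁.length := by
          simp [hv₁, hd₁, PySem.List.length_pySetD, hlen]
        have hlv : v₁.length = v.length := by simp [hv₁, PySem.List.length_pySetD]
        have hrest1 : ∀ n ∈ rest, 0 ≤ n ∧ n < (v₁.length : Int) := by
          rw [hlv]; exact hrest
        have hIR : PySem.Raise.InRange v.length node := ⟨by omega, hnode.2⟩
        have hIRd : PySem.Raise.InRange d.length node := ⟨by omega, by rw [← hlen]; exact hnode.2⟩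
        have hvtrue : PySem.List.pyGetD v₁ node false = true :=
          pyGetD_pySetD_self v node true false hIR
        have hdval : PySem.List.pyGetD d₁ node 0 = dn :=
          pyGetD_pySetD_self d node dn 0 hIRd
        obtain ⟨⟨new₁, hq', hnew₁, hcnt⟩, hl1, hl2, hmono, hpres⟩ :=
          ih v₁ d₁ (q ++ [node]) hlen1 hrest1 v' d' q' h
        have hcountv : v₁.count false + 1 = v.count false :=
          count_false_set v node hnode.1 hnode.2 hv'
        refine ⟨⟨node :: new₁, by simpa using hq', ?_, ?_⟩, by omega, by
            simpa [hd₁, PySem.List.length_pySetD] using hl2, ?_, ?_⟩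
        · intro c hc
          rcases List.mem_cons.mp hc with hc1 | hc1
          · subst hc1
            exact ⟨hmono c hvtrue, hdval ▸ hpres c hvtrue⟩
          · exact hnew₁ c hc1
        · simp only [List.length_cons]
          omega
        · intro c hc
          exact hmono c (pyGetD_true_mono v node c hc)
        · intro c hc
          have h1 : PySem.List.pyGetD v₁ c false = true := pyGetD_true_mono v node c hc
          have h2 := hpres c h1
          rw [h2, hd₁]
          exact pyGetD_stable_of_visited v d node c dn hlen hc hv'

def runA (N : Int) (K : Int) (cityD : PySem.Dict Int (List Int)) :
    List Int → List Bool → List Int → List Int → (List Bool × List Int × List Int) ⊕ List Int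
  | [], v, d, q => Sum.inl (v, d, q)
  | c :: f, v, d, q =>
    match bfsInnerA K c (PySem.Dict.get? cityD c) (PySem.List.pyRange 1 (N + 1) 1) v d q with
    | Sum.inr d' => Sum.inr d'
    | Sum.inl (v', d', q') => runA N K cityD f v' d' q'

theorem innerA_append (K curr : Int) (adj? : Option (List Int)) :
    ∀ (nodes : List Int) (v : List Bool) (d : List Int) (a b : List Int),
      bfsInnerA K curr adj? nodes v d (a ++ b) =
        (match bfsInnerA K curr adj? nodes v d b with
          | Sum.inr d' => Sum.inr d'
          | Sum.inl (v', d', q') => Sum.inl (v', d', a ++ q')) := by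
  intro nodes
  induction nodes with
  | nil => intro v d a b; rfl
  | cons node rest ih =>
    intro v d a b
    rw [bfsInnerA, bfsInnerA]
    by_cases h1 : (PySem.List.pyGetD v node false || adj?.isNone
        || !((adj?.getD []).contains node)) = true
    · rw [if_pos h1, if_pos h1]
      exact ih v d a b
    · rw [if_neg h1, if_neg h1]
      dsimp only
      split_ifs
      · rfl
      · rw [show a ++ b ++ [node] = a ++ (b ++ [node]) by simp]
        exact ih _ _ a _

theorem loopA_split (N K : Int) (cityD : PySem.Dict Int (List Int)) :
    ∀ (f g : List Int) (v : List Bool) (d : List Int) (fuel : Nat),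
      bfsLoopA N K cityD (f.length + fuel) (f ++ g) v d =
        (match runA N K cityD f v d g with
          | Sum.inr d' => d'
          | Sum.inl (v', d', g') => bfsLoopA N K cityD fuel g' v' d') := by
  intro f
  induction f with
  | nil =>
    intro g v d fuel
    simp only [List.length_nil, Nat.zero_add, List.nil_append, runA]
  | cons c f ih =>
    intro g v d fuel
    have h1 : (c :: f).length + fuel = (f.length + fuel) + 1 := by simp; omega
    rw [h1, List.cons_append, bfsLoopA, runA, innerA_append K c _ _ v d f g]
    cases hres : bfsInnerA K c (PySem.Dict.get? cityD c) (PySem.List.pyRange 1 (N + 1) 1) v d g with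
    | inr d' => rfl
    | inl s =>
      obtain ⟨v', d', q'⟩ := s
      exact ih q' v' d' fuel

theorem loopA_split' (N K : Int) (cityD : PySem.Dict Int (List Int))
    (f : List Int) (v : List Bool) (d : List Int) (fuel : Nat) :
    bfsLoopA N K cityD (f.length + fuel) f v d =
      (match runA N K cityD f v d [] with
        | Sum.inr d' => d'
        | Sum.inl (v', d', g') => bfsLoopA N K cityD fuel g' v' d') := by
  have h := loopA_split N K cityD f [] v d fuel
  simpa using h

theorem loopA_nil (N K : Int) (cityD : PySem.Dict Int (List Int)) :
    ∀ (fuel : Nat) (v : List Bool) (d : List Int), bfsLoopA N K cityD fuel [] v d = d := by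
  intro fuel v d
  cases fuel <;> rfl

theorem outerB_cons (N K : Int) (cityD : PySem.Dict Int (List Int)) (fuel : Nat) (lvl c : Int)
    (f : List Int) (v : List Bool) (d : List Int) :
    bfsOuterB N K cityD (fuel + 1) lvl (c :: f) v d =
      (match bfsLevelB N K cityD (lvl + 1) (c :: f) v d [] with
        | Sum.inr d' => d'
        | Sum.inl (v', d', nxt) => bfsOuterB N K cityD fuel (lvl + 1) nxt v' d') := rfl

theorem outerB_nil (N K : Int) (cityD : PySem.Dict Int (List Int)) (fuel : Nat) (lvl : Int)
    (v : List Bool) (d : List Int) :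
    bfsOuterB N K cityD fuel lvl [] v d = d := by
  cases fuel <;> rfl

def FrontInv (f : List Int) (lvl : Int) (v : List Bool) (d : List Int) : Prop :=
  ∀ c ∈ f, PySem.List.pyGetD v c false = true ∧ PySem.List.pyGetD d c 0 = lvl

theorem level_sim (N K : Int) (cityD : PySem.Dict Int (List Int)) (lvl : Int) :
    ∀ (f : List Int) (v : List Bool) (d q : List Int),
      v.length = (N + 1).toNat → v.length = d.length →
      FrontInv f lvl v d →
      runA N K cityD f v d q = bfsLevelB N K cityD (lvl + 1) f v d q ∧
      (∀ v' d' q', runA N K cityD f v d q = Sum.inl (v', d', q') →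
        InnerPost (lvl + 1) v d q v' d' q') := by
  intro f
  induction f with
  | nil =>
    intro v d q _ _ _
    refine ⟨rfl, ?_⟩
    intro v' d' q' h
    cases h
    exact ⟨⟨[], by simp, by simp, by simp⟩, rfl, rfl, fun _ h => h, fun _ _ => rfl⟩
  | cons c f ih =>
    intro v d q hvN hlen hinv
    have hc := (hinv c (by simp)).1
    have hcd := (hinv c (by simp)).2
    have hadj : (PySem.Dict.get? cityD c).getD [] = PySem.Dict.getD cityD c [] := by
      cases h : PySem.Dict.get? cityD c with
      | none => simp [PySem.Dict.getD_of_get?_eq_none cityD [] h]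
      | some l => simp [PySem.Dict.getD_of_get?_eq_some cityD [] h]
    -- the common pre-filtered node list of this frontier element
    set LB := (PySem.List.sorted (PySem.Set.ofList (PySem.Dict.getD cityD c [])) (fun x => x)
        false).filter (fun n => decide (1 ≤ n) && decide (n ≤ N)) with hLB
    have hAeq : ∀ (q0 : List Int), bfsInnerA K c (PySem.Dict.get? cityD c)
        (PySem.List.pyRange 1 (N + 1) 1) v d q0 = bfsInnerD K (lvl + 1) LB v d q0 := by
      intro q0
      rw [innerA_eq_innerC, hadj, filter_lists_eq N (PySem.Dict.getD cityD c []),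
        innerC_eq_innerD K c _ v d q0 hlen hc, hcd]
    have hBeq : ∀ (q0 : List Int), bfsNbrB N K (lvl + 1)
        (PySem.List.sorted (PySem.Set.ofList (PySem.Dict.getD cityD c [])) (fun x => x) false)
        v d q0 = bfsInnerD K (lvl + 1) LB v d q0 := by
      intro q0
      rw [nbrB_eq_innerD]
    have hbounds : ∀ n ∈ LB, 0 ≤ n ∧ n < (v.length : Int) := by
      intro n hn
      rw [hLB] at hn
      have := List.of_mem_filter hn
      simp only [Bool.and_eq_true, decide_eq_true_eq] at this
      constructor
      · omega
      · rw [hvN]; omega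
    rw [runA, bfsLevelB, hAeq, hBeq]
    cases hres : bfsInnerD K (lvl + 1) LB v d q with
    | inr d' => exact ⟨rfl, by intro v' d' q' h; cases h⟩
    | inl s =>
      obtain ⟨v₁, d₁, q₁⟩ := s
      have hpost1 := innerD_post K (lvl + 1) LB v d q hlen hbounds v₁ d₁ q₁ hres
      obtain ⟨⟨new₁, hq₁, hnew₁, hcnt₁⟩, hL1, hL2, hmono₁, hpres₁⟩ := hpost1
      have hvN1 : v₁.length = (N + 1).toNat := by rw [hL1]; exact hvN
      have hlen1 : v₁.length = d₁.length := by rw [hL1, hL2]; exact hlen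
      have hinv1 : FrontInv f lvl v₁ d₁ := by
        intro c' hc'
        have h := hinv c' (by simp [hc'])
        exact ⟨hmono₁ c' h.1, by rw [hpres₁ c' h.1]; exact h.2⟩
      obtain ⟨heq2, hpost2⟩ := ih v₁ d₁ q₁ hvN1 hlen1 hinv1
      refine ⟨heq2, ?_⟩
      intro v' d' q' h
      obtain ⟨⟨new₂, hq₂, hnew₂, hcnt₂⟩, hM1, hM2, hmono₂, hpres₂⟩ := hpost2 v' d' q' h
      refine ⟨⟨new₁ ++ new₂, by rw [hq₂, hq₁, List.append_assoc], ?_, ?_⟩,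
        by omega, by omega, ?_, ?_⟩
      · intro x hx
        rcases List.mem_append.mp hx with hx1 | hx1
        · have h1 := hnew₁ x hx1
          exact ⟨hmono₂ x h1.1, by rw [hpres₂ x h1.1]; exact h1.2⟩
        · exact hnew₂ x hx1
      · rw [List.length_append]; omega
      · intro x hx; exact hmono₂ x (hmono₁ x hx)
      · intro x hx
        rw [hpres₂ x (hmono₁ x hx)]
        exact hpres₁ x hx

theorem main_sim (N K : Int) (cityD : PySem.Dict Int (List Int)) :
    ∀ (fb : Nat) (f : List Int) (v : List Bool) (d : List Int) (lvl : Int) (fa : Nat),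
      v.length = (N + 1).toNat → v.length = d.length →
      FrontInv f lvl v d →
      f.length + v.count false ≤ fa →
      v.count false + 1 ≤ fb →
      bfsLoopA N K cityD fa f v d = bfsOuterB N K cityD fb lvl f v d := by
  intro fb
  induction fb with
  | zero => intro f v d lvl fa _ _ _ _ hfb; omega
  | succ fb ih =>
    intro f v d lvl fa hvN hlen hinv hfa _
    cases f with
    | nil => rw [loopA_nil]; rfl
    | cons c f =>
      have hfa' : fa = (c :: f).length + (fa - (c :: f).length) := by
        simp at hfa ⊢; omega
      rw [hfa', loopA_split']
      obtain ⟨heq, hpost⟩ := level_sim N K cityD lvl (c :: f) v d [] hvN hlen hinv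
      rw [heq, outerB_cons]
      cases hres : bfsLevelB N K cityD (lvl + 1) (c :: f) v d [] with
      | inr d' => rfl
      | inl s =>
        obtain ⟨v', d', nxt⟩ := s
        dsimp only
        have hP := hpost v' d' nxt (by rw [heq]; simpa using hres)
        obtain ⟨⟨new, hq, hnew, hcnt⟩, hL1, hL2, _, _⟩ := hP
        have hnxt : nxt = new := by simpa using hq
        rw [hnxt]
        cases hnil : new with
        | nil => rw [loopA_nil, outerB_nil]
        | cons a as =>
          apply ih
          · rw [hL1]; exact hvN
          · rw [hL1, hL2]; exact hlen
          · intro x hx; exact hnew x (hnil ▸ hx)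
          · have hlen' : (c :: f).length = f.length + 1 := by simp
            rw [← hnil]
            omega
          · have h1 : 1 ≤ new.length := by rw [hnil]; simp
            omega

-- end-to-end equality of the two ports
theorem bfs_eq (N : Int) (K : Int) (X : Int) (city : List (Int × List Int))
    (hpre : PySem.Raise.InRange (N + 1).toNat X) :
    BFS N K X city = BFS_alt N K X city := by
  unfold BFS BFS_alt
  set v0 := PySem.List.pySetD (List.replicate (N + 1).toNat false) X true with hv0
  have hlenrep : (List.replicate (N + 1).toNat false).length = (N + 1).toNat := by simp
  have hvN : v0.length = (N + 1).toNat := by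
    rw [hv0, PySem.List.length_pySetD, hlenrep]
  have hlen : v0.length = (List.replicate (N + 1).toNat (0 : Int)).length := by
    rw [hvN]; simp
  refine main_sim N K (PySem.Dict.ofList city) (N.toNat + 2) [X] v0
    (List.replicate (N + 1).toNat (0 : Int)) 0 (N.toNat + 2) hvN hlen ?_ ?_ ?_
  · intro c hc
    have hcX : c = X := by simpa using hc
    subst hcX
    constructor
    · exact pyGetD_pySetD_self _ c true false (by rw [hlenrep]; exact hpre)
    · exact pyGetD_replicate_zero _ c
  · have hcle : v0.count false ≤ v0.length := List.count_le_length
    simp only [List.length_singleton]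
    omega
  · have hcle : v0.count false ≤ v0.length := List.count_le_length
    omega

-- ===== VERDICT (by name: the statement is the Claim_ definition above) =====
theorem BFS_spec : Claim_equal_BFS := by
  intro N K X city _ hpre
  unfold Spec_BFS
  exact bfs_eq N K X city hpre
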